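-- pv_equiv track=rewrite | github.com/harjassand/AGI-Stack-Unchained | CDEL-v2/cdel/v19_0/shadow_fs_guard_v1.py | diff_file_maps
-- ===== SOURCE A (Python) =====
-- def diff_file_maps(before: dict[str, dict[str, str]], after: dict[str, dict[str, str]]) -> list[str]:
--     mutated: set[str] = set()
--     all_roots = set(before.keys()) | set(after.keys())
--     for root in all_roots:
--         left = before.get(root, {})
--         right = after.get(root, {})
--         all_paths = set(left.keys()) | set(right.keys())
--         for rel in all_paths:
--             if left.get(rel) != right.get(rel):
--                 mutated.add(rel)
--     return sorted(mutated)
-- ===== SOURCE B (Python) =====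
-- def diff_file_maps(before: dict[str, dict[str, str]], after: dict[str, dict[str, str]]) -> list[str]:
--     flat_before = {(root, rel): v for root, m in before.items() for rel, v in m.items()}
--     flat_after = {(root, rel): v for root, m in after.items() for rel, v in m.items()}
--     keys = set(flat_before) | set(flat_after)
--     mutated = {rel for (root, rel) in keys
--                if flat_before.get((root, rel)) != flat_after.get((root, rel))}
--     return sorted(mutated)
-- ===== Notes on version B (the rewrite author's own statement) =====
-- stated objective: alternative
-- what changed: B flattens both nested maps into single-level dicts keyed by (root, rel) tuples and makes one pass over the union of composite keys, instead of A's nested loops over roots and then paths with per-root sub-dict lookups.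
import Mathlib
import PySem

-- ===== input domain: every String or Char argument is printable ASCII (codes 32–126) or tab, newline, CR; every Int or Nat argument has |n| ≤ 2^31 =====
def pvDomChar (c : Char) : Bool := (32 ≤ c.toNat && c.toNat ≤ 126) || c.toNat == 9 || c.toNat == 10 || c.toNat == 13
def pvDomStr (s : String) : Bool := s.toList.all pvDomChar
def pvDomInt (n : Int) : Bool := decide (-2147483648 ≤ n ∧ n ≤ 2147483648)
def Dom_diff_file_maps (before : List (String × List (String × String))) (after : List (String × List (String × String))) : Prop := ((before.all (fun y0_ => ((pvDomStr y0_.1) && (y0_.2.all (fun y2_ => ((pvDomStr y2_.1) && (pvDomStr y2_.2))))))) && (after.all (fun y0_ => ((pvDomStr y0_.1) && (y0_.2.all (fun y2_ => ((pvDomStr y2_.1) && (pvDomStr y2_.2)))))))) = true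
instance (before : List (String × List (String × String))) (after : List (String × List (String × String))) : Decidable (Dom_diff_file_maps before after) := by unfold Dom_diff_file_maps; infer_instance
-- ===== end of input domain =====

-- B replaces A's nested loops over roots/paths by flattening both maps into one dict keyed by (root, rel) and one pass over the union of composite keys (alternative decomposition, same cost).

-- ===== PORT A =====
def diff_file_maps (before : List (String × List (String × String))) (after : List (String × List (String × String))) : List String :=
  let bd := PySem.Dict.ofList before
  let ad := PySem.Dict.ofList after
  let all_roots := PySem.Set.union (PySem.Set.ofList bd.keys) ad.keys
  let mutated := all_roots.foldl (fun mutated root =>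
      let left := PySem.Dict.ofList (bd.getD root [])
      let right := PySem.Dict.ofList (ad.getD root [])
      let all_paths := PySem.Set.union (PySem.Set.ofList left.keys) right.keys
      all_paths.foldl (fun mutated rel =>
          if left.get? rel ≠ right.get? rel then PySem.Set.add mutated rel else mutated)
        mutated)
    PySem.Set.empty
  PySem.List.sorted mutated (fun x => x) false

-- ===== PORT B =====
-- the flat dict comprehension {(root, rel): v for root, m in d.items() for rel, v in m.items()}
def pvFlatten (m : List (String × List (String × String))) : PySem.Dict (String × String) String :=
  (PySem.Dict.ofList m).items.foldl
    (fun f p => (PySem.Dict.ofList p.2).items.foldl (fun f q => f.insert (p.1, q.1) q.2) f)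
    PySem.Dict.empty

def diff_file_maps_alt (before : List (String × List (String × String))) (after : List (String × List (String × String))) : List String :=
  let flat_before := pvFlatten before
  let flat_after := pvFlatten after
  let keys := PySem.Set.union (PySem.Set.ofList flat_before.keys) flat_after.keys
  let mutated := keys.foldl (fun s k =>
      if flat_before.get? k ≠ flat_after.get? k then PySem.Set.add s k.2 else s)
    PySem.Set.empty
  PySem.List.sorted mutated (fun x => x) false

-- ===== PRECONDITION & SPEC =====
def Spec_diff_file_maps (before : List (String × List (String × String))) (after : List (String × List (String × String))) (out : List String) : Prop := out = diff_file_maps_alt before after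
instance (before : List (String × List (String × String))) (after : List (String × List (String × String))) (out : List String) : Decidable (Spec_diff_file_maps before after out) := by unfold Spec_diff_file_maps; infer_instance

-- ===== CLAIM (what is proved, stated in full; the proofs are below) =====
def Claim_equal_diff_file_maps : Prop := ∀ (before : List (String × List (String × String))) (after : List (String × List (String × String))), Dom_diff_file_maps before after → Spec_diff_file_maps before after (diff_file_maps before after)

-- ===== LEMMAS AND PROOFS =====

-- the value of map m at root r, path x (the quantity both programs compare)
def pvL (m : List (String × List (String × String))) (r x : String) : Option String :=
  (PySem.Dict.ofList ((PySem.Dict.ofList m).getD r [])).get? x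

-- A's mutated set, named (lets zeta-reduced; defeq to the body of diff_file_maps)
def pvMutA (before after : List (String × List (String × String))) : PySem.Set String :=
  (PySem.Set.union (PySem.Set.ofList (PySem.Dict.ofList before).keys) (PySem.Dict.ofList after).keys).foldl
    (fun mutated root =>
      (PySem.Set.union
          (PySem.Set.ofList (PySem.Dict.ofList ((PySem.Dict.ofList before).getD root [])).keys)
          (PySem.Dict.ofList ((PySem.Dict.ofList after).getD root [])).keys).foldl
        (fun mutated rel =>
          if (PySem.Dict.ofList ((PySem.Dict.ofList before).getD root [])).get? rel
               ≠ (PySem.Dict.ofList ((PySem.Dict.ofList after).getD root [])).get? rel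
          then PySem.Set.add mutated rel else mutated)
        mutated)
    PySem.Set.empty

-- B's mutated set, named
def pvMutB (before after : List (String × List (String × String))) : PySem.Set String :=
  (PySem.Set.union (PySem.Set.ofList (pvFlatten before).keys) (pvFlatten after).keys).foldl
    (fun s k =>
      if (pvFlatten before).get? k ≠ (pvFlatten after).get? k then PySem.Set.add s k.2 else s)
    PySem.Set.empty

theorem diff_file_maps_eq (before after : List (String × List (String × String))) :
    diff_file_maps before after = PySem.List.sorted (pvMutA before after) (fun x => x) false := rfl

theorem diff_file_maps_alt_eq (before after : List (String × List (String × String))) :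
    diff_file_maps_alt before after = PySem.List.sorted (pvMutB before after) (fun x => x) false := rfl

-- generic 'if p a then s.add (g a)' loop: membership
theorem mem_foldl_add_if {α β : Type} [BEq β] [LawfulBEq β] (l : List α) (p : α → Prop)
    [DecidablePred p] (g : α → β) (s0 : PySem.Set β) (x : β) :
    (x ∈ l.foldl (fun s a => if p a then PySem.Set.add s (g a) else s) s0) ↔
      x ∈ s0 ∨ ∃ a ∈ l, p a ∧ g a = x := by
  induction l generalizing s0 with
  | nil => simp
  | cons a t ih =>
    simp only [List.foldl_cons, ih]
    by_cases h : p a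
    · simp only [h, if_pos, PySem.Set.mem_add, List.mem_cons]
      constructor
      · rintro (⟨hs | rfl⟩ | ⟨b, hb, hp, rfl⟩)
        · exact Or.inl hs
        · exact Or.inr ⟨a, Or.inl rfl, h, rfl⟩
        · exact Or.inr ⟨b, Or.inr hb, hp, rfl⟩
      · rintro (hs | ⟨b, (rfl | hb), hp, rfl⟩)
        · exact Or.inl (Or.inl hs)
        · exact Or.inl (Or.inr rfl)
        · exact Or.inr ⟨b, hb, hp, rfl⟩
    · simp only [h, List.mem_cons]
      constructor
      · rintro (hs | ⟨b, hb, hp, rfl⟩)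
        · exact Or.inl hs
        · exact Or.inr ⟨b, Or.inr hb, hp, rfl⟩
      · rintro (hs | ⟨b, (rfl | hb), hp, rfl⟩)
        · exact Or.inl hs
        · exact absurd hp h
        · exact Or.inr ⟨b, hb, hp, rfl⟩

-- generic 'if p a then s.add (g a)' loop: nodup preserved
theorem nodup_foldl_add_if {α β : Type} [BEq β] [LawfulBEq β] (l : List α) (p : α → Prop)
    [DecidablePred p] (g : α → β) (s0 : PySem.Set β) (h : s0.Nodup) :
    (l.foldl (fun s a => if p a then PySem.Set.add s (g a) else s) s0).Nodup := by
  induction l generalizing s0 with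
  | nil => exact h
  | cons a t ih =>
    simp only [List.foldl_cons]
    apply ih
    by_cases hp : p a
    · simpa [hp] using PySem.Set.nodup_add s0 (g a) h
    · simpa [hp] using h

-- A's nested double loop: membership
theorem mem_foldl_foldl_add_if {α β : Type} [BEq β] [LawfulBEq β] (l : List α)
    (g : α → List β) (p : α → β → Prop) [inst : ∀ a, DecidablePred (p a)]
    (s0 : PySem.Set β) (x : β) :
    (x ∈ l.foldl (fun s a => (g a).foldl
        (fun s b => if p a b then PySem.Set.add s b else s) s) s0) ↔
      x ∈ s0 ∨ ∃ a ∈ l, ∃ b ∈ g a, p a b ∧ b = x := by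
  induction l generalizing s0 with
  | nil => simp
  | cons a t ih =>
    simp only [List.foldl_cons, ih, List.mem_cons,
      mem_foldl_add_if (g a) (p a) (fun b => b) s0 x]
    constructor
    · rintro ((hs | ⟨b, hb, hp, rfl⟩) | ⟨a', ha', b, hb, hp, rfl⟩)
      · exact Or.inl hs
      · exact Or.inr ⟨a, Or.inl rfl, b, hb, hp, rfl⟩
      · exact Or.inr ⟨a', Or.inr ha', b, hb, hp, rfl⟩
    · rintro (hs | ⟨a', (rfl | ha'), b, hb, hp, rfl⟩)
      · exact Or.inl (Or.inl hs)
      · exact Or.inl (Or.inr ⟨b, hb, hp, rfl⟩)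
      · exact Or.inr ⟨a', ha', b, hb, hp, rfl⟩

-- A's nested double loop: nodup
theorem nodup_foldl_foldl_add_if {α β : Type} [BEq β] [LawfulBEq β] (l : List α)
    (g : α → List β) (p : α → β → Prop) [∀ a, DecidablePred (p a)]
    (s0 : PySem.Set β) (h : s0.Nodup) :
    (l.foldl (fun s a => (g a).foldl
        (fun s b => if p a b then PySem.Set.add s b else s) s) s0).Nodup := by
  induction l generalizing s0 with
  | nil => exact h
  | cons a t ih => exact ih _ (nodup_foldl_add_if (g a) (p a) (fun b => b) s0 h)

-- inner flatten loop over one root's items: effect on one lookup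
theorem flat_inner_get (inner : List (String × String)) (r0 r x : String) :
    (inner.map Prod.fst).Nodup → ∀ f : PySem.Dict (String × String) String,
    (inner.foldl (fun f q => f.insert (r0, q.1) q.2) f).get? (r, x)
      = if r0 = r then ((PySem.Dict.mk inner).get? x).or (f.get? (r, x)) else f.get? (r, x) := by
  induction inner with
  | nil =>
    intro _ f
    by_cases h : r0 = r <;> simp [h, PySem.Dict.get?]
  | cons q t ih =>
    intro hnd f
    simp only [List.map_cons, List.nodup_cons] at hnd
    rw [List.foldl_cons, ih hnd.2, PySem.Dict.get?_insert, PySem.Dict.get?_mk_cons]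
    by_cases hr : r0 = r
    · subst hr
      by_cases hx : q.1 = x
      · subst hx
        have ht : (PySem.Dict.mk t).get? q.1 = none := by
          rw [PySem.Dict.get?_eq_none_iff_not_mem_keys]
          simpa [PySem.Dict.keys] using hnd.1
        simp [ht]
      · have hne : (r0, x) ≠ (r0, q.1) := by
          intro h; injection h with h1 h2; exact hx h2.symm
        simp [hne, hx]
    · have hne : (r, x) ≠ (r0, q.1) := fun h => hr (congrArg Prod.fst h).symm
      simp [hr, hne]

-- outer flatten loop: one lookup in the flattened dict
theorem flat_get_aux (l : List (String × List (String × String))) (r x : String) :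
    (l.map Prod.fst).Nodup → ∀ f : PySem.Dict (String × String) String,
    (l.foldl (fun f p => (PySem.Dict.ofList p.2).items.foldl
        (fun f q => f.insert (p.1, q.1) q.2) f) f).get? (r, x)
      = ((PySem.Dict.ofList ((PySem.Dict.mk l).getD r [])).get? x).or (f.get? (r, x)) := by
  induction l with
  | nil =>
    intro _ f
    have h1 : (PySem.Dict.mk ([] : List (String × List (String × String)))).getD r [] = [] := rfl
    have h2 : (PySem.Dict.ofList ([] : List (String × String))).get? x = none := rfl
    rw [List.foldl_nil, h1, h2, Option.none_or]
  | cons p t ih =>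
    intro hnd f
    simp only [List.map_cons, List.nodup_cons] at hnd
    have hinner : ((PySem.Dict.ofList p.2).items.map Prod.fst).Nodup := by
      have := PySem.Dict.nodup_keys_ofList (ps := p.2)
      simpa [PySem.Dict.keys] using this
    rw [List.foldl_cons, ih hnd.2, flat_inner_get _ _ _ _ hinner]
    have heta : PySem.Dict.mk (p :: t) = PySem.Dict.mk ((p.1, p.2) :: t) := rfl
    by_cases hr : p.1 = r
    · have ht0 : (PySem.Dict.mk t).get? r = none := by
        rw [PySem.Dict.get?_eq_none_iff_not_mem_keys]
        simpa [PySem.Dict.keys, hr] using hnd.1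
      have ht : (PySem.Dict.mk t).getD r [] = [] := by
        rw [PySem.Dict.getD_eq_get?_getD, ht0]; rfl
      have hc : (PySem.Dict.mk (p :: t)).getD r [] = p.2 := by
        rw [heta, PySem.Dict.getD_eq_get?_getD, PySem.Dict.get?_mk_cons]
        simp [hr]
      have hmkitems : PySem.Dict.mk (PySem.Dict.ofList p.2).items = PySem.Dict.ofList p.2 := rfl
      have hnil : (PySem.Dict.ofList ([] : List (String × String))).get? x = none := rfl
      rw [ht, hc, hmkitems, if_pos hr, hnil, Option.none_or]
    · have hc : (PySem.Dict.mk (p :: t)).getD r [] = (PySem.Dict.mk t).getD r [] := by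
        rw [heta, PySem.Dict.getD_eq_get?_getD, PySem.Dict.get?_mk_cons,
          PySem.Dict.getD_eq_get?_getD]
        simp [hr]
      rw [if_neg hr, hc]

theorem pvFlatten_get (m : List (String × List (String × String))) (r x : String) :
    (pvFlatten m).get? (r, x) = pvL m r x := by
  have hnd : (((PySem.Dict.ofList m).items).map Prod.fst).Nodup := by
    have := PySem.Dict.nodup_keys_ofList (ps := m)
    simpa [PySem.Dict.keys] using this
  have h := flat_get_aux ((PySem.Dict.ofList m).items) r x hnd PySem.Dict.empty
  simpa [pvFlatten, pvL, PySem.Dict.get?_empty] using h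

-- if the value exists, the root is a key
theorem pvL_root_mem (m : List (String × List (String × String))) (r x : String)
    (h : pvL m r x ≠ none) : r ∈ (PySem.Dict.ofList m).keys := by
  by_contra hk
  have h0 : (PySem.Dict.ofList m).get? r = none :=
    (PySem.Dict.get?_eq_none_iff_not_mem_keys _ _).mpr hk
  apply h
  have hd : (PySem.Dict.ofList m).getD r [] = [] := by
    rw [PySem.Dict.getD_eq_get?_getD, h0]; rfl
  show (PySem.Dict.ofList ((PySem.Dict.ofList m).getD r [])).get? x = none
  rw [hd]; rfl

-- if the value exists, the path is a key of the inner dict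
theorem pvL_path_mem (m : List (String × List (String × String))) (r x : String)
    (h : pvL m r x ≠ none) :
    x ∈ (PySem.Dict.ofList ((PySem.Dict.ofList m).getD r [])).keys := by
  by_contra hk
  exact h ((PySem.Dict.get?_eq_none_iff_not_mem_keys _ _).mpr hk)

-- if the value exists, the composite key is a key of the flattened dict
theorem pvFlatten_key_mem (m : List (String × List (String × String))) (r x : String)
    (h : pvL m r x ≠ none) : (r, x) ∈ (pvFlatten m).keys := by
  by_contra hk
  exact h (by rw [← pvFlatten_get]; exact (PySem.Dict.get?_eq_none_iff_not_mem_keys _ _).mpr hk)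

-- membership characterisation of A's mutated set
theorem mem_pvMutA (before after : List (String × List (String × String))) (x : String) :
    x ∈ pvMutA before after ↔ ∃ r, pvL before r x ≠ pvL after r x := by
  unfold pvMutA
  rw [mem_foldl_foldl_add_if]
  simp only [PySem.Set.empty, List.not_mem_nil, false_or]
  constructor
  · rintro ⟨r, _, rel, _, hp, rfl⟩
    exact ⟨r, hp⟩
  · rintro ⟨r, hne⟩
    have hx : pvL before r x ≠ none ∨ pvL after r x ≠ none := by
      rcases h1 : pvL before r x with _ | v
      · exact Or.inr (fun h2 => hne (h1.trans h2.symm))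
      · exact Or.inl (by simp)
    refine ⟨r, ?_, x, ?_, hne, rfl⟩
    · rcases hx with h | h
      · exact (PySem.Set.mem_union _ _ _).mpr (Or.inl ((PySem.Set.mem_ofList _ _).mpr (pvL_root_mem _ _ _ h)))
      · exact (PySem.Set.mem_union _ _ _).mpr (Or.inr (pvL_root_mem _ _ _ h))
    · rcases hx with h | h
      · exact (PySem.Set.mem_union _ _ _).mpr (Or.inl ((PySem.Set.mem_ofList _ _).mpr (pvL_path_mem _ _ _ h)))
      · exact (PySem.Set.mem_union _ _ _).mpr (Or.inr (pvL_path_mem _ _ _ h))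

-- membership characterisation of B's mutated set
theorem mem_pvMutB (before after : List (String × List (String × String))) (x : String) :
    x ∈ pvMutB before after ↔ ∃ r, pvL before r x ≠ pvL after r x := by
  unfold pvMutB
  rw [mem_foldl_add_if]
  simp only [PySem.Set.empty, List.not_mem_nil, false_or]
  constructor
  · rintro ⟨⟨r, y⟩, _, hp, rfl⟩
    exact ⟨r, by rwa [pvFlatten_get, pvFlatten_get] at hp⟩
  · rintro ⟨r, hne⟩
    have hx : pvL before r x ≠ none ∨ pvL after r x ≠ none := by
      rcases h1 : pvL before r x with _ | v
      · exact Or.inr (fun h2 => hne (h1.trans h2.symm))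
      · exact Or.inl (by simp)
    refine ⟨(r, x), ?_, by rwa [pvFlatten_get, pvFlatten_get], rfl⟩
    rcases hx with h | h
    · exact (PySem.Set.mem_union _ _ _).mpr (Or.inl ((PySem.Set.mem_ofList _ _).mpr (pvFlatten_key_mem _ _ _ h)))
    · exact (PySem.Set.mem_union _ _ _).mpr (Or.inr (pvFlatten_key_mem _ _ _ h))

-- ===== VERDICT (by name: the statement is the Claim_ definition above) =====
theorem diff_file_maps_spec : Claim_equal_diff_file_maps := by
  intro before after _
  unfold Spec_diff_file_maps
  rw [diff_file_maps_eq, diff_file_maps_alt_eq]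
  apply PySem.List.sorted_eq_sorted_of_perm _ _ _ (fun a b h => h)
  apply (List.perm_ext_iff_of_nodup ?_ ?_).mpr
  · intro a
    rw [mem_pvMutA, mem_pvMutB]
  · exact nodup_foldl_foldl_add_if _ _ _ _ List.nodup_nil
  · exact nodup_foldl_add_if _ _ _ _ List.nodup_nil
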